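-- pv_equiv track=rewrite | github.com/AttyaG/MINDBOX_JOB | simple_group.py | calc
-- ===== SOURCE A (Python) =====
-- def sum_of_nums(num):
--     s = 0
--     while (num != 0):
--         s = s + num % 10
--         num = num // 10
--     return s
--
-- def calc(n_customers, n_first_id):
--     groups = {}
--     for i in range(n_first_id, n_first_id+n_customers-1):
--         x = sum_of_nums(i)
--         if x in groups:
--             groups[x] += 1
--         else:
--             groups[x] = 1
--     return groups
-- ===== SOURCE B (Python) =====
-- def _ds(n):
--     return 0 if n == 0 else n % 10 + _ds(n // 10)
--
-- def calc(n_customers, n_first_id):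
--     sums = [_ds(i) for i in range(n_first_id, n_first_id + n_customers - 1)]
--     groups = {}
--     for s in sums:
--         if s not in groups:
--             groups[s] = sums.count(s)
--     return groups
-- ===== Notes on version B (the rewrite author's own statement) =====
-- stated objective: alternative
-- what changed: B first materialises the list of digit sums (computed by plain recursion instead of a while-loop accumulator) and then builds the dict in one pass that only records each digit sum at its first occurrence, taking its total multiplicity wholesale via list.count, instead of A's incremental per-element counter updates.
import Mathlib
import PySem

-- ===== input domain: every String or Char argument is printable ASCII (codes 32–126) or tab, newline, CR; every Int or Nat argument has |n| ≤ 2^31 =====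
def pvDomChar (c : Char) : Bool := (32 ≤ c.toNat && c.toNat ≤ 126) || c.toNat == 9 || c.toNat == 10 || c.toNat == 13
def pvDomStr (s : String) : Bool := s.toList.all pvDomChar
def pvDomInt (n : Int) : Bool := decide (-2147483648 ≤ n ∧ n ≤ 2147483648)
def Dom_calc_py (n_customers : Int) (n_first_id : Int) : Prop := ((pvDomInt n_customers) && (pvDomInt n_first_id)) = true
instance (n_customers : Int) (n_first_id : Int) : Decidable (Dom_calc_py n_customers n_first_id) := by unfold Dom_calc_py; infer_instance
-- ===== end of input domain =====

-- B materialises the list of digit sums (plain recursion instead of a while-loop accumulator) and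
-- builds the dict in one pass that records each digit sum only at its first occurrence with its
-- wholesale multiplicity (list.count), instead of A's incremental per-element counter updates.


-- ===== PORT A =====
-- sum_of_nums: 's' is the accumulator of the while loop; the loop condition 'num != 0' is written
-- '0 < num' only to make the port total — for num < 0 the Python loop never terminates (num // 10
-- has fixpoint -1), so no return value is claimed there (the ports still agree on every input).
def sumOfNums (num : Int) (s : Int) : Int :=
  if 0 < num then sumOfNums (PySem.Int.floordiv num 10) (s + PySem.Int.mod num 10) else s
termination_by num.toNat
decreasing_by
  rw [PySem.Int.floordiv_eq_ediv_of_pos (by omega : (0:Int) < 10)]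
  omega

def calc_py (n_customers : Int) (n_first_id : Int) : List (Int × Int) :=
  ((PySem.List.pyRange n_first_id (n_first_id + n_customers - 1) 1).foldl
    (fun (g : PySem.Dict Int Int) i =>
      let x := sumOfNums i 0
      match g.get? x with
      | some v => g.insert x (v + 1)   -- x in groups: groups[x] += 1
      | none   => g.insert x 1)        -- else: groups[x] = 1
    PySem.Dict.empty).items

-- ===== PORT B =====
-- _ds(n): pure recursion; the guard '0 < n' makes it total (Python hits RecursionError for n < 0,
-- where A never returns either).
def dsB (n : Int) : Int :=
  if 0 < n then PySem.Int.mod n 10 + dsB (PySem.Int.floordiv n 10) else 0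
termination_by n.toNat
decreasing_by
  rw [PySem.Int.floordiv_eq_ediv_of_pos (by omega : (0:Int) < 10)]
  omega

def calc_py_alt (n_customers : Int) (n_first_id : Int) : List (Int × Int) :=
  let sums := (PySem.List.pyRange n_first_id (n_first_id + n_customers - 1) 1).map dsB
  (sums.foldl
    (fun (g : PySem.Dict Int Int) s =>
      if g.contains s then g else g.insert s ((PySem.List.count sums s : Int)))
    PySem.Dict.empty).items

-- ===== PRECONDITION & SPEC =====
def Spec_calc_py (n_customers : Int) (n_first_id : Int) (out : List (Int × Int)) : Prop := out = calc_py_alt n_customers n_first_id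
instance (n_customers : Int) (n_first_id : Int) (out : List (Int × Int)) : Decidable (Spec_calc_py n_customers n_first_id out) := by unfold Spec_calc_py; infer_instance

-- ===== CLAIM (what is proved, stated in full; the proofs are below) =====
def Claim_equal_calc_py : Prop := ∀ (n_customers : Int) (n_first_id : Int), Dom_calc_py n_customers n_first_id → Spec_calc_py n_customers n_first_id (calc_py n_customers n_first_id)

-- ===== LEMMAS AND PROOFS =====

-- A's while-loop accumulator equals s plus B's recursive digit sum.
theorem sumOfNums_eq_dsB (num s : Int) : sumOfNums num s = s + dsB num := by
  rw [sumOfNums, dsB]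
  split
  · rw [sumOfNums_eq_dsB]; ring
  · simp
termination_by num.toNat
decreasing_by
  rw [PySem.Int.floordiv_eq_ediv_of_pos (by omega : (0:Int) < 10)]
  omega

-- A's loop body is the standard counter update.
theorem stepA_eq (g : PySem.Dict Int Int) (x : Int) :
    (match g.get? x with
     | some v => g.insert x (v + 1)
     | none   => g.insert x 1) = g.insert x (g.getD x 0 + 1) := by
  cases h : g.get? x <;> simp [PySem.Dict.getD_eq_get?_getD, h]

-- contains on a dict of shape ⟨S.map (k, c k)⟩ is membership in S.
theorem contains_mk_map (S : List Int) (c : Int → Int) (x : Int) :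
    (PySem.Dict.mk (S.map (fun k => (k, c k)))).contains x = PySem.Set.contains S x := by
  simp [PySem.Dict.contains_mk, List.any_map, Function.comp_def, PySem.Set.contains, List.any_beq']

-- B's first-occurrence loop, generalised over the already-recorded keys S.
theorem loopB_general (c : Int → Int) (L : List Int) : ∀ (S : List Int),
    L.foldl (fun (g : PySem.Dict Int Int) s => if g.contains s then g else g.insert s (c s))
        (PySem.Dict.mk (S.map (fun k => (k, c k))))
      = PySem.Dict.mk ((PySem.Set.update S L).map (fun k => (k, c k))) := by
  induction L with
  | nil => intro S; simp [PySem.Set.update]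
  | cons x L ih =>
    intro S
    have hupd : PySem.Set.update S (x :: L) = PySem.Set.update (PySem.Set.add S x) L := rfl
    rw [List.foldl_cons, hupd, contains_mk_map]
    by_cases hx : PySem.Set.contains S x
    · have hadd : PySem.Set.add S x = S := by unfold PySem.Set.add; rw [hx]; simp
      rw [hx, if_pos rfl, hadd]
      exact ih S
    · rw [Bool.not_eq_true] at hx
      rw [hx, if_neg (by simp)]
      have hnc : (PySem.Dict.mk (S.map (fun k => (k, c k)))).contains x = false := by
        rw [contains_mk_map, hx]
      have hins : (PySem.Dict.mk (S.map (fun k => (k, c k)))).insert x (c x)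
          = PySem.Dict.mk ((S ++ [x]).map (fun k => (k, c k))) := by
        apply PySem.Dict.ext
        rw [PySem.Dict.items_insert_of_not_contains _ _ hnc]
        simp
      rw [hins]
      have hadd : PySem.Set.add S x = S ++ [x] := by unfold PySem.Set.add; rw [hx]; simp
      rw [hadd]
      exact ih (S ++ [x])

-- ===== VERDICT (by name: the statement is the Claim_ definition above) =====
theorem calc_py_spec : Claim_equal_calc_py := by
  intro nc nid _
  unfold Spec_calc_py
  simp only [calc_py, calc_py_alt]
  set R := PySem.List.pyRange nid (nid + nc - 1) 1 with hR
  -- A's fold is Counter(sums) for sums = R.map dsB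
  have hA : (R.foldl (fun (g : PySem.Dict Int Int) i =>
        let x := sumOfNums i 0
        match g.get? x with
        | some v => g.insert x (v + 1)
        | none => g.insert x 1) PySem.Dict.empty) = PySem.Dict.counter (R.map dsB) := by
    rw [← PySem.Dict.foldl_insert_getD_add_one_eq_counter, List.foldl_map]
    apply PySem.List.foldl_congr_mem
    intro g i _
    show (match g.get? (sumOfNums i 0) with
          | some v => g.insert (sumOfNums i 0) (v + 1)
          | none => g.insert (sumOfNums i 0) 1) = g.insert (dsB i) (g.getD (dsB i) 0 + 1)
    have hds : sumOfNums i 0 = dsB i := by rw [sumOfNums_eq_dsB]; ring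
    rw [stepA_eq, hds]
  -- B's fold records first occurrences with wholesale counts
  have hB : ((R.map dsB).foldl
      (fun (g : PySem.Dict Int Int) s =>
        if g.contains s then g else g.insert s ((PySem.List.count (R.map dsB) s : Int)))
      PySem.Dict.empty)
      = PySem.Dict.mk ((PySem.Set.ofList (R.map dsB)).map
          (fun k => (k, ((PySem.List.count (R.map dsB) k : Int))))) := by
    have h := loopB_general (fun s => (PySem.List.count (R.map dsB) s : Int)) (R.map dsB) []
    simpa [PySem.Dict.empty, PySem.Set.ofList_eq_foldl, PySem.Set.update] using h
  rw [hA, hB, PySem.Dict.items_counter]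
  simp [PySem.List.count]
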